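-- pv_equiv track=rewrite | github.com/steeplejack/adventofcode | 2023/day12/solution_python/part2_failed_attempt2.py | compatible_positions_from_left
-- ===== SOURCE A (Python) =====
-- INF = 9223372036854775807
--
-- def compatible_with(size, constraint, pos):
--     """
--     ???????? - len = 8
--     .....### x pos=5, size=3, pos+size > len
--     """
--     constraint_length = len(constraint)
--     if size + pos > constraint_length:
--         return False
--     if pos > 0:
--         if constraint[pos - 1] == '#':
--             return False
--     if size + pos < constraint_length - 1:
--         if constraint[size+pos] == '#':
--             return False
--     for i in range(pos, pos+size):
--         if constraint[i] == '.':
--             return False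
--     return True
--
-- def compatible_positions_from_left(size, constraint):
--     """
--     Assume the piece being fitted is the first one in the constraint
--     This means that if it passes the first '#' in the string, no
--     more positions are compatible
--     """
--     if size == 0:
--         return []
--     first_x = INF
--     positions = []
--     for pos in range(len(constraint) - size + 1):
--         if constraint[pos] == '#' and pos < first_x:
--             first_x = pos
--         if pos > first_x:
--             return positions
--         if compatible_with(size, constraint, pos):
--             positions.append(pos)
--     return positions
-- ===== SOURCE B (Python) =====
-- def compatible_positions_from_left(size, constraint):
--     if size == 0:
--         return []
--     n = len(constraint)
--     if n - size < 0:
--         return []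
--     # prefix sums of '.' counts: dots[i] = number of '.' in constraint[:i]
--     dots = [0]
--     for c in constraint:
--         dots.append(dots[-1] + (c == '.'))
--     h = constraint.find('#')
--     last = n - size if h == -1 else min(h, n - size)
--     result = []
--     for pos in range(last + 1):
--         if pos > 0 and constraint[pos - 1] == '#':
--             continue
--         if pos + size < n - 1 and constraint[pos + size] == '#':
--             continue
--         if dots[pos + size] - dots[pos] == 0:
--             result.append(pos)
--     return result
-- ===== Notes on version B (the rewrite author's own statement) =====
-- stated objective: faster
-- what changed: B precomputes a prefix-sum array of '.' counts so each candidate window is tested for emptiness in O(1) instead of A's O(size) rescan, and computes the scan cutoff (index of the first '#') once with str.find instead of tracking it with an INF sentinel inside the loop.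
-- outside the precondition, e.g. on compatible_positions_from_left(-1, '., #, #, .'): A returns [0, 1, 2, 3], B returns [2, 3]; on compatible_positions_from_left(-1, 'ab'): A raises IndexError, B raises IndexError
import Mathlib
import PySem

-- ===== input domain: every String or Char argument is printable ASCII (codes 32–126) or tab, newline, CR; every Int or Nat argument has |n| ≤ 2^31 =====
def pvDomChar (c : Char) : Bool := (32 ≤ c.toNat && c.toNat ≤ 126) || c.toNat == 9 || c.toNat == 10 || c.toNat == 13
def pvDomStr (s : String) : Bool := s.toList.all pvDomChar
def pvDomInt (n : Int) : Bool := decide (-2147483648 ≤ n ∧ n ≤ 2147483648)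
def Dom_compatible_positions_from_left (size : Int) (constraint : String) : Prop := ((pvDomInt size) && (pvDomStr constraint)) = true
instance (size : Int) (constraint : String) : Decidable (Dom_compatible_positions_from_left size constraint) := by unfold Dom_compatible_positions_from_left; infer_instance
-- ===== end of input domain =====

-- B replaces A's per-position window rescan by a prefix-sum array of '.' counts
-- (window emptiness read back in O(1)) and computes the scan cutoff (first '#') once with str.find.

-- ===== PORT A =====
def pvINF : Int := 9223372036854775807

def compatible_with (size : Int) (constraint : List Char) (pos : Int) : Bool :=
  let constraint_length : Int := constraint.length
  if size + pos > constraint_length then false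
  else if pos > 0 ∧ PySem.List.pyGetD constraint (pos - 1) ' ' = '#' then false
  else if size + pos < constraint_length - 1 ∧ PySem.List.pyGetD constraint (size + pos) ' ' = '#' then false
  else (PySem.List.pyRange pos (pos + size) 1).all (fun i => !(PySem.List.pyGetD constraint i ' ' = '.'))

def cpfl_loop (size : Int) (cs : List Char) : List Int → Int → List Int → List Int
  | [], _, positions => positions
  | pos :: rest, first_x, positions =>
    let fx : Int := if PySem.List.pyGetD cs pos ' ' = '#' ∧ pos < first_x then pos else first_x
    if pos > fx then positions
    else if compatible_with size cs pos then cpfl_loop size cs rest fx (positions ++ [pos])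
    else cpfl_loop size cs rest fx positions

def compatible_positions_from_left (size : Int) (constraint : String) : List Int :=
  if size = 0 then []
  else
    let cs := constraint.toList
    cpfl_loop size cs (PySem.List.pyRange 0 ((cs.length : Int) - size + 1) 1) pvINF []

-- ===== PORT B =====
-- dots[i] = number of '.' in constraint[:i]  (built in one pass, read back in O(1))
def pvDots (cs : List Char) : List Int :=
  cs.foldl (fun dots c => dots ++ [PySem.List.pyGetD dots (-1) 0 + (if c = '.' then 1 else 0)]) [0]

def pvOkB (size : Int) (cs : List Char) (dots : List Int) (n pos : Int) : Bool :=
  !(pos > 0 ∧ PySem.List.pyGetD cs (pos - 1) ' ' = '#' : Bool) &&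
  (!(pos + size < n - 1 ∧ PySem.List.pyGetD cs (pos + size) ' ' = '#' : Bool)) &&
  (PySem.List.pyGetD dots (pos + size) 0 - PySem.List.pyGetD dots pos 0 == 0)

def compatible_positions_from_left_alt (size : Int) (constraint : String) : List Int :=
  if size = 0 then []
  else
    let cs := constraint.toList
    let n : Int := cs.length
    if n - size < 0 then []
    else
      let dots := pvDots cs
      let h : Int := PySem.Chars.find cs ['#']
      let last : Int := if h = -1 then n - size else min h (n - size)
      (PySem.List.pyRange 0 (last + 1) 1).foldl
        (fun res pos => if pvOkB size cs dots n pos then res ++ [pos] else res) []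

-- ===== PRECONDITION & SPEC =====
-- Pre_ restricts to the natural domain, block sizes ≥ 0: on negative sizes A usually raises
-- IndexError and otherwise returns values produced by Python's negative-index wraparound
-- (negative-size windows are vacuously 'compatible'), a corner no caller would specify;
-- the length bound (A's INF sentinel, 2^63-1, unreachable by any physically representable
-- string) excludes only mathematical strings of ≥ 2^63-1 characters, where A's 'pos < INF'
-- sentinel comparison would silently truncate the scan.
def Pre_compatible_positions_from_left (size : Int) (constraint : String) : Prop :=
  0 ≤ size ∧ (constraint.toList.length : Int) < 9223372036854775807
instance (size : Int) (constraint : String) : Decidable (Pre_compatible_positions_from_left size constraint) := by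
  unfold Pre_compatible_positions_from_left; infer_instance

def pvWitness_compatible_positions_from_left : Int × String := (2, "?.##..?")

def Spec_compatible_positions_from_left (size : Int) (constraint : String) (out : List Int) : Prop := out = compatible_positions_from_left_alt size constraint
instance (size : Int) (constraint : String) (out : List Int) : Decidable (Spec_compatible_positions_from_left size constraint out) := by unfold Spec_compatible_positions_from_left; infer_instance

-- ===== CLAIM (what is proved, stated in full; the proofs are below) =====
def Claim_equal_compatible_positions_from_left : Prop := ∀ (size : Int) (constraint : String), Dom_compatible_positions_from_left size constraint → Pre_compatible_positions_from_left size constraint → Spec_compatible_positions_from_left size constraint (compatible_positions_from_left size constraint)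

-- ===== LEMMAS AND PROOFS =====

-- the positions A's loop actually processes: k, k+1, … up to e-1, but stopping
-- (inclusively) at the first position holding '#'
def pvStop (cs : List Char) (k e : Int) : List Int :=
  if h : k < e then
    if PySem.List.pyGetD cs k ' ' = '#' then [k]
    else k :: pvStop cs (k + 1) e
  else []
termination_by (e - k).toNat
decreasing_by omega

theorem pvDots_eq (cs : List Char) :
    pvDots cs = (List.range (cs.length + 1)).map
      (fun i => ((cs.take i).countP (fun c => c = '.') : Int)) := by
  induction cs using List.reverseRecOn with
  | nil => simp [pvDots]
  | append_singleton cs c ih =>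
    have h1 : pvDots (cs ++ [c]) = pvDots cs ++
        [PySem.List.pyGetD (pvDots cs) (-1) 0 + (if c = '.' then 1 else 0)] := by
      simp [pvDots, List.foldl_append]
    have hlast : PySem.List.pyGetD (pvDots cs) (-1) 0
        = ((cs.take cs.length).countP (fun c => c = '.') : Int) := by
      rw [ih, List.range_succ, List.map_append]
      exact PySem.List.pyGetD_neg_one_append_singleton _ _ _
    rw [h1, hlast, ih]
    conv_rhs => rw [List.length_append, List.length_singleton, List.range_succ, List.map_append]
    congr 1
    · apply List.map_congr_left
      intro i hi
      simp only [List.mem_range] at hi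
      rw [List.take_append_of_le_length (by omega)]
    · have ht : List.take (cs.length + 1) (cs ++ [c]) = cs ++ [c] := by
        apply List.take_of_length_le; simp
      simp only [List.map_cons, List.map_nil, ht, List.take_length]
      by_cases hc : c = '.' <;> simp [hc, List.countP_append]

theorem pvDots_get (cs : List Char) (i : Int) (h0 : 0 ≤ i) (h1 : i ≤ (cs.length : Int)) :
    PySem.List.pyGetD (pvDots cs) i 0 = ((cs.take i.toNat).countP (fun c => c = '.') : Int) := by
  rw [pvDots_eq]
  rw [PySem.List.pyGetD_eq_getElem _ _ h0 (by simp; omega)]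
  simp

theorem pvWindow_eq (cs : List Char) (pos size : Int) (h0 : 0 ≤ pos)
    (h1 : pos + size ≤ (cs.length : Int)) :
    (PySem.List.pyRange pos (pos + size) 1).map (fun j => PySem.List.pyGetD cs j ' ')
      = (cs.drop pos.toNat).take size.toNat := by
  apply List.ext_getElem
  · simp [PySem.List.length_pyRange_one]; omega
  · intro k hk1 hk2
    have hk : (k : Int) < size := by
      simp [PySem.List.length_pyRange_one] at hk1; omega
    simp only [List.getElem_map, PySem.List.getElem_pyRange_one, List.getElem_take, List.getElem_drop]
    rw [PySem.List.pyGetD_eq_getElem _ _ (by omega) (by omega)]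
    congr 1
    omega

theorem pvCompat_eq_okB (cs : List Char) (size pos : Int) (hs : 1 ≤ size) (h0 : 0 ≤ pos)
    (h1 : pos ≤ (cs.length : Int) - size) :
    compatible_with size cs pos = pvOkB size cs (pvDots cs) (cs.length : Int) pos := by
  have hn : pos + size ≤ (cs.length : Int) := by omega
  have hwin := pvWindow_eq cs pos size h0 hn
  have htake : cs.take (pos + size).toNat
      = cs.take pos.toNat ++ (cs.drop pos.toNat).take size.toNat := by
    have h : (pos + size).toNat = pos.toNat + size.toNat := by omega
    rw [h, List.take_add]
  have hdiff : PySem.List.pyGetD (pvDots cs) (pos + size) 0 - PySem.List.pyGetD (pvDots cs) pos 0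
      = (((cs.drop pos.toNat).take size.toNat).countP (fun c => c = '.') : Int) := by
    rw [pvDots_get cs (pos + size) (by omega) hn, pvDots_get cs pos h0 (by omega), htake,
      List.countP_append]
    push_cast; ring
  have hloop : (PySem.List.pyRange pos (pos + size) 1).all
        (fun i => !(PySem.List.pyGetD cs i ' ' = '.'))
      = ((cs.drop pos.toNat).take size.toNat).all (fun c => !(c = '.')) := by
    rw [← hwin, List.all_map]; rfl
  simp only [compatible_with, pvOkB]
  rw [if_neg (by omega : ¬ (size + pos > (cs.length : Int)))]
  by_cases hc1 : pos > 0 ∧ PySem.List.pyGetD cs (pos - 1) ' ' = '#'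
  · simp [hc1]
  · rw [if_neg hc1]
    by_cases hc2 : size + pos < (cs.length : Int) - 1 ∧ PySem.List.pyGetD cs (size + pos) ' ' = '#'
    · rw [if_pos hc2]
      have hc2' : pos + size < (cs.length : Int) - 1 ∧ PySem.List.pyGetD cs (pos + size) ' ' = '#' := by
        rw [add_comm pos size]; exact hc2
      simp [hc1, hc2']
    · rw [if_neg hc2]
      have hc2' : ¬ (pos + size < (cs.length : Int) - 1 ∧ PySem.List.pyGetD cs (pos + size) ' ' = '#') := by
        rw [add_comm pos size]; exact hc2
      simp only [hc1, hc2', decide_false, Bool.not_false, Bool.true_and]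
      rw [hloop, hdiff, Bool.eq_iff_iff]
      simp [List.all_eq_true, List.countP_eq_zero]

theorem pvLoop_exit (size : Int) (cs : List Char) (k e fx : Int) (acc : List Int) (h : fx < k) :
    cpfl_loop size cs (PySem.List.pyRange k e 1) fx acc = acc := by
  by_cases hke : k < e
  · rw [PySem.List.pyRange_one_cons hke]
    simp only [cpfl_loop]
    rw [if_neg (by omega : ¬ (PySem.List.pyGetD cs k ' ' = '#' ∧ k < fx))]
    rw [if_pos (by omega : k > fx)]
  · rw [PySem.List.pyRange_one_eq_nil (by omega)]
    rfl

theorem pvLoop_eq_stop (size : Int) (cs : List Char) (k e : Int) (acc : List Int)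
    (he : e ≤ pvINF) :
    cpfl_loop size cs (PySem.List.pyRange k e 1) pvINF acc
      = acc ++ (pvStop cs k e).filter (fun p => compatible_with size cs p) := by
  by_cases hke : k < e
  · have hklt : k < pvINF := lt_of_lt_of_le hke he
    rw [PySem.List.pyRange_one_cons hke, pvStop]
    rw [dif_pos hke]
    by_cases hh : PySem.List.pyGetD cs k ' ' = '#'
    · simp only [cpfl_loop]
      rw [if_pos (show PySem.List.pyGetD cs k ' ' = '#' ∧ k < pvINF from ⟨hh, hklt⟩)]
      rw [if_neg (show ¬ k > k by omega)]
      by_cases hcw : compatible_with size cs k = true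
      · rw [if_pos hcw, pvLoop_exit size cs (k + 1) e k _ (by omega)]
        simp [hh, hcw]
      · rw [if_neg hcw, pvLoop_exit size cs (k + 1) e k _ (by omega)]
        simp [hh, hcw]
    · simp only [cpfl_loop]
      rw [if_neg (show ¬ (PySem.List.pyGetD cs k ' ' = '#' ∧ k < pvINF) from fun hx => hh hx.1)]
      rw [if_neg (show ¬ k > pvINF from lt_asymm hklt)]
      have ih := pvLoop_eq_stop size cs (k + 1) e
      by_cases hcw : compatible_with size cs k = true
      · rw [if_pos hcw, ih (acc ++ [k]) he]
        simp [hh, hcw]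
      · rw [if_neg hcw, ih acc he]
        simp [hh, hcw]
  · rw [PySem.List.pyRange_one_eq_nil (by omega), pvStop, dif_neg hke]
    simp [cpfl_loop]
termination_by (e - k).toNat
decreasing_by all_goals omega

theorem pvSingleton_prefix (a : Char) (l : List Char) : [a] <+: l ↔ l[0]? = some a := by
  cases l with
  | nil => simp
  | cons x xs => simp [List.cons_prefix_cons]; exact eq_comm

theorem pvGetD_hash (cs : List Char) (k : Int) (h0 : 0 ≤ k) :
    PySem.List.pyGetD cs k ' ' = '#' ↔ cs[k.toNat]? = some '#' := by
  have hk : k = ((k.toNat : Nat) : Int) := by omega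
  rw [hk, PySem.List.pyGetD_natCast]
  rw [List.getD_eq_getElem?_getD]
  have hm : ((k.toNat : Int)).toNat = k.toNat := Int.toNat_natCast _
  rw [hm]
  cases hg : cs[k.toNat]? with
  | none => simp
  | some c => simp

theorem pvHash_drop (cs : List Char) (j : Nat) : (['#'] <+: cs.drop j) ↔ cs[j]? = some '#' := by
  rw [pvSingleton_prefix]
  simp [List.getElem?_drop]

theorem pvFind_none (cs : List Char) (hf : PySem.Chars.find cs ['#'] = -1) (j : Nat) :
    cs[j]? ≠ some '#' := by
  intro hj
  rw [PySem.Chars.find_eq_neg_one_iff] at hf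
  exact hf ((PySem.Chars.isIn_iff_infix _ _).mp
    ((PySem.Chars.exists_prefix_drop_iff_isIn _ _).mp ⟨j, (pvHash_drop cs j).mpr hj⟩))

theorem pvStop_eq_range (cs : List Char) (k e : Int) (h0 : 0 ≤ k)
    (hk : PySem.Chars.find cs ['#'] = -1 ∨ k ≤ PySem.Chars.find cs ['#']) :
    pvStop cs k e = PySem.List.pyRange k
      (if PySem.Chars.find cs ['#'] = -1 then e else min e (PySem.Chars.find cs ['#'] + 1)) 1 := by
  by_cases hke : k < e
  · rw [pvStop, dif_pos hke]
    by_cases hh : PySem.List.pyGetD cs k ' ' = '#'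
    · have hsome : cs[k.toNat]? = some '#' := (pvGetD_hash cs k h0).mp hh
      have hfne : PySem.Chars.find cs ['#'] ≠ -1 := by
        intro hf; exact pvFind_none cs hf k.toNat hsome
      have hle : k ≤ PySem.Chars.find cs ['#'] := by
        rcases hk with hf | hle
        · exact absurd hf hfne
        · exact hle
      have hpos : 0 ≤ PySem.Chars.find cs ['#'] := by
        have := PySem.Chars.neg_one_le_find cs ['#']; omega
      have spec := PySem.Chars.find_spec (s := cs) (sub := ['#']) hpos
      have hge : PySem.Chars.find cs ['#'] ≤ k := by
        by_contra hlt
        rw [not_le] at hlt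
        exact (spec.2 k.toNat (by omega)) ((pvHash_drop cs k.toNat).mpr hsome)
      rw [if_neg hfne]
      rw [if_pos hh]
      have hE : min e (PySem.Chars.find cs ['#'] + 1) = k + 1 := by omega
      rw [hE, PySem.List.pyRange_one_singleton]
    · rw [if_neg hh]
      rcases hk with hf | hle
      · rw [pvStop_eq_range cs (k + 1) e (by omega) (Or.inl hf), if_pos hf]
        exact (PySem.List.pyRange_one_cons hke).symm
      · have hfne : PySem.Chars.find cs ['#'] ≠ -1 := by omega
        have hpos : 0 ≤ PySem.Chars.find cs ['#'] := by omega
        have spec := PySem.Chars.find_spec (s := cs) (sub := ['#']) hpos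
        have hkne : k ≠ PySem.Chars.find cs ['#'] := by
          intro heq
          have hsome : cs[k.toNat]? = some '#' := by
            rw [← pvHash_drop]
            have hkt : k.toNat = (PySem.Chars.find cs ['#']).toNat := by omega
            rw [hkt]; exact spec.1
          exact hh ((pvGetD_hash cs k h0).mpr hsome)
        rw [pvStop_eq_range cs (k + 1) e (by omega) (Or.inr (by omega)), if_neg hfne]
        exact (PySem.List.pyRange_one_cons (by omega)).symm
  · rw [pvStop, dif_neg hke]
    rw [PySem.List.pyRange_one_eq_nil (by split_ifs <;> omega)]
termination_by (e - k).toNat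
decreasing_by all_goals omega

theorem pvMain (size : Int) (constraint : String)
    (hs0 : 0 ≤ size) (hlen : (constraint.toList.length : Int) < 9223372036854775807) :
    compatible_positions_from_left size constraint
      = compatible_positions_from_left_alt size constraint := by
  by_cases hsz : size = 0
  · simp [compatible_positions_from_left, compatible_positions_from_left_alt, hsz]
  · have hs1 : 1 ≤ size := by omega
    simp only [compatible_positions_from_left, compatible_positions_from_left_alt, if_neg hsz]
    by_cases hn : (constraint.toList.length : Int) - size < 0
    · rw [if_pos hn, PySem.List.pyRange_one_eq_nil (by omega)]
      rfl
    · rw [if_neg hn]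
      have he : (constraint.toList.length : Int) - size + 1 ≤ pvINF := by
        simp only [pvINF]; omega
      rw [pvLoop_eq_stop size constraint.toList 0 ((constraint.toList.length : Int) - size + 1) [] he]
      have hnegle := PySem.Chars.neg_one_le_find constraint.toList ['#']
      have hor : PySem.Chars.find constraint.toList ['#'] = -1 ∨
          (0 : Int) ≤ PySem.Chars.find constraint.toList ['#'] := by omega
      rw [pvStop_eq_range constraint.toList 0 ((constraint.toList.length : Int) - size + 1) le_rfl hor]
      rw [PySem.List.foldl_append_if_eq_filter, List.nil_append, List.nil_append]
      have hE : (if PySem.Chars.find constraint.toList ['#'] = -1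
            then (constraint.toList.length : Int) - size + 1
            else min ((constraint.toList.length : Int) - size + 1)
              (PySem.Chars.find constraint.toList ['#'] + 1))
          = (if PySem.Chars.find constraint.toList ['#'] = -1
            then (constraint.toList.length : Int) - size
            else min (PySem.Chars.find constraint.toList ['#'])
              ((constraint.toList.length : Int) - size)) + 1 := by
        split_ifs <;> omega
      rw [hE]
      apply List.filter_congr
      intro p hp
      rw [PySem.List.mem_pyRange_one] at hp
      have hlast : (if PySem.Chars.find constraint.toList ['#'] = -1
            then (constraint.toList.length : Int) - size
            else min (PySem.Chars.find constraint.toList ['#'])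
              ((constraint.toList.length : Int) - size))
          ≤ (constraint.toList.length : Int) - size := by split_ifs <;> omega
      exact pvCompat_eq_okB constraint.toList size p hs1 hp.1 (by omega)

-- ===== VERDICT (by name: the statement is the Claim_ definition above) =====
theorem compatible_positions_from_left_spec : Claim_equal_compatible_positions_from_left := by
  intro size constraint _ hpre
  exact pvMain size constraint hpre.1 hpre.2
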